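-- pv_equiv track=rewrite | github.com/KyoungSoo1996/python-coding-practice | python project/This is Coding Test/selectBall.py | Answer
-- ===== SOURCE A (Python) =====
-- def Answer(N,M, Balls):
--     array = [0] * 11
--     for x in Balls:
--         array[x] += 1
--     result = 0
--     for i in range(1, M[0]+1):
--         N[0] -= array[i]
--         result += array[i] * N[0]
--     return result
-- ===== SOURCE B (Python) =====
-- def Answer(N, M, Balls):
--     counts = [0] * 11
--     for x in Balls:
--         counts[x] += 1
--     m = M[0]
--     if m < 1:
--         return 0
--     picked = counts[1:m + 1]
--     S = sum(picked)
--     N[0] -= S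
--     return (N[0] + S) * S - (S * S + sum(a * a for a in picked)) // 2
-- ===== Notes on version B (the rewrite author's own statement) =====
-- stated objective: alternative
-- what changed: Instead of A's second loop that subtracts each count from N[0] and accumulates the running product, B slices the first M[0] count buckets out of the table, takes their sum S and sum of squares, and produces the answer in one closed-form expression N0*S - (S*S + sum(a*a))//2, updating N[0] once.
import Mathlib
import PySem

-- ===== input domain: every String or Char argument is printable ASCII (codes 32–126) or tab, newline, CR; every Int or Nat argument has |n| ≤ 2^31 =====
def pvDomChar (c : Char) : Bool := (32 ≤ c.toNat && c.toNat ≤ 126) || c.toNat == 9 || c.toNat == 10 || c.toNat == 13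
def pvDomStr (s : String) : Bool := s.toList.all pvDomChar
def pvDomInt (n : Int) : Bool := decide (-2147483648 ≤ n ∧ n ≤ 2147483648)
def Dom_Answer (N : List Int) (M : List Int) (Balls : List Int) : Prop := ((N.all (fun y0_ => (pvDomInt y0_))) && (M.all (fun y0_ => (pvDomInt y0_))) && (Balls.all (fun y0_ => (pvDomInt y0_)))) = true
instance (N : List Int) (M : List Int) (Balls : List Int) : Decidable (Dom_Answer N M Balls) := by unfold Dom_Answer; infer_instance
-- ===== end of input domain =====

-- B drops A's running-subtraction loop: it slices the first M[0] count buckets and combines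
-- them in one closed form N0*S - (S*S + Σa²)//2; return-value equivalence (both Pythons leave
-- the same final value in N[0], A stepwise, B once).

-- ===== PORT A =====
def Answer (N : List Int) (M : List Int) (Balls : List Int) : Int :=
  let array : List Int := Balls.foldl
    (fun arr x => PySem.List.pySetD arr x (PySem.List.pyGetD arr x 0 + 1))
    (List.replicate 11 0)
  -- loop state: (current N[0], result)
  ((PySem.List.pyRange 1 (PySem.List.pyGetD M 0 0 + 1) 1).foldl
    (fun (p : Int × Int) i =>
      let a := PySem.List.pyGetD array i 0
      (p.1 - a, p.2 + a * (p.1 - a)))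
    (PySem.List.pyGetD N 0 0, 0)).2

-- ===== PORT B =====
def Answer_alt (N : List Int) (M : List Int) (Balls : List Int) : Int :=
  let counts : List Int := Balls.foldl
    (fun c x => PySem.List.pySetD c x (PySem.List.pyGetD c x 0 + 1))
    (List.replicate 11 0)
  let m := PySem.List.pyGetD M 0 0
  if m < 1 then 0
  else
    let picked := PySem.List.slice counts (some 1) (some (m + 1))
    let S := picked.sum
    let n := PySem.List.pyGetD N 0 0 - S
    (n + S) * S - PySem.Int.floordiv (S * S + (picked.map (fun a => a * a)).sum) 2

-- ===== PRECONDITION & SPEC =====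
-- Pre_ is exactly the inputs where Python A returns normally: it raises IndexError on empty M,
-- on M[0] ≥ 11 (array[i] past the 11-slot table), on a ball value outside the valid
-- (negative-wrapping) index range -11..10, and on empty N when the loop runs (M[0] ≥ 1).
def Pre_Answer (N : List Int) (M : List Int) (Balls : List Int) : Prop :=
  M ≠ [] ∧ PySem.List.pyGetD M 0 0 ≤ 10 ∧ (∀ x ∈ Balls, -11 ≤ x ∧ x < 11) ∧
    (1 ≤ PySem.List.pyGetD M 0 0 → N ≠ [])
instance (N : List Int) (M : List Int) (Balls : List Int) : Decidable (Pre_Answer N M Balls) := by unfold Pre_Answer; infer_instance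

def pvWitness_Answer : List Int × List Int × List Int := ([10], [3], [1, 2, 2, 3])

def Spec_Answer (N : List Int) (M : List Int) (Balls : List Int) (out : Int) : Prop := out = Answer_alt N M Balls
instance (N : List Int) (M : List Int) (Balls : List Int) (out : Int) : Decidable (Spec_Answer N M Balls out) := by unfold Spec_Answer; infer_instance

-- ===== CLAIM (what is proved, stated in full; the proofs are below) =====
def Claim_equal_Answer : Prop := ∀ (N : List Int) (M : List Int) (Balls : List Int), Dom_Answer N M Balls → Pre_Answer N M Balls → Spec_Answer N M Balls (Answer N M Balls)

-- ===== LEMMAS AND PROOFS =====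

def pvS (g : Int → Int) (l : List Int) : Int := (l.map g).sum
def pvQ (g : Int → Int) (l : List Int) : Int := (l.map (fun i => g i * g i)).sum

lemma foldA_eq (g : Int → Int) (l : List Int) (n r : Int) :
    (l.foldl (fun (p : Int × Int) i => (p.1 - g i, p.2 + g i * (p.1 - g i))) (n, r)).1
      = n - pvS g l
    ∧ 2 * (l.foldl (fun (p : Int × Int) i => (p.1 - g i, p.2 + g i * (p.1 - g i))) (n, r)).2
      = 2 * r + 2 * n * pvS g l - pvS g l * pvS g l - pvQ g l := by
  induction l generalizing n r with
  | nil => simp [pvS, pvQ]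
  | cons a t ih =>
    obtain ⟨h1, h2⟩ := ih (n - g a) (r + g a * (n - g a))
    refine ⟨?_, ?_⟩
    · simp only [List.foldl, h1, pvS, List.map, List.sum_cons]; ring
    · simp only [List.foldl] at h2 ⊢
      rw [h2]; simp only [pvS, pvQ, List.map, List.sum_cons]; ring

lemma counts_length (Balls : List Int) (init : List Int) :
    (Balls.foldl
      (fun c x => PySem.List.pySetD c x (PySem.List.pyGetD c x 0 + 1)) init).length
      = init.length := by
  induction Balls generalizing init with
  | nil => rfl
  | cons b t ih => simp only [List.foldl]; rw [ih, PySem.List.length_pySetD]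

lemma range_map_eq_drop_take (xs : List Int) (n : Nat) (hn : n ≤ xs.length - 1) :
    (List.range n).map (fun k => xs.getD (1 + k) 0) = (xs.drop 1).take n := by
  apply List.ext_getElem
  · simp at hn ⊢
    omega
  · intro i h1 h2
    have hi : 1 + i < xs.length := by
      simp at h1; omega
    simp only [List.getElem_map, List.getElem_range, List.getElem_take, List.getElem_drop]
    rw [List.getD_eq_getElem?_getD, List.getElem?_eq_getElem hi]
    rfl

-- ===== VERDICT (by name: the statement is the Claim_ definition above) =====
theorem Answer_spec : Claim_equal_Answer := by
  intro N M Balls _ hpre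
  obtain ⟨_, hm10, _, _⟩ := hpre
  unfold Spec_Answer Answer Answer_alt
  simp only
  set counts : List Int := Balls.foldl
    (fun c x => PySem.List.pySetD c x (PySem.List.pyGetD c x 0 + 1))
    (List.replicate 11 0) with hcounts
  have hlen : counts.length = 11 := by
    rw [hcounts, counts_length, List.length_replicate]
  set m := PySem.List.pyGetD M 0 0 with hmdef
  by_cases hm : m < 1
  · rw [if_pos hm, PySem.List.pyRange_one_eq_nil (by omega)]
    rfl
  · rw [if_neg hm]
    set g : Int → Int := fun i => PySem.List.pyGetD counts i 0 with hg
    set l := PySem.List.pyRange 1 (m + 1) 1 with hl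
    -- the sliced bucket list equals the loop's reads
    have hmnat : ((m + 1).toNat - (1 : Int).toNat) = m.toNat := by omega
    have hpicked : PySem.List.slice counts (some 1) (some (m + 1)) = l.map g := by
      rw [PySem.List.slice_toNat counts (by omega : (0:Int) ≤ 1) (by omega : (0:Int) ≤ m + 1), hmnat,
        hl, PySem.List.pyRange_one]
      have : ((m + 1 - 1).toNat) = m.toNat := by omega
      rw [this, List.map_map]
      simp only [Int.toNat_one]
      rw [← range_map_eq_drop_take counts m.toNat (by omega)]
      apply List.map_congr_left
      intro k hk
      simp only [Function.comp, hg]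
      rw [show (1 + (k : Int)) = ((1 + k : Nat) : Int) by push_cast; ring,
        PySem.List.pyGetD_natCast]
    obtain ⟨_, hA⟩ := foldA_eq g l (PySem.List.pyGetD N 0 0) 0
    set n0 := PySem.List.pyGetD N 0 0 with hn0
    set R := (l.foldl
      (fun (p : Int × Int) i => (p.1 - g i, p.2 + g i * (p.1 - g i))) (n0, 0)).2 with hR
    rw [hpicked]
    have hS : (l.map g).sum = pvS g l := rfl
    have hQ : ((l.map g).map (fun a => a * a)).sum = pvQ g l := by
      rw [List.map_map]; rfl
    rw [hS, hQ]
    set S := pvS g l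
    set Q := pvQ g l
    have key : S * S + Q = 2 * (n0 * S - R) := by linear_combination hA
    rw [key, PySem.Int.floordiv_eq_ediv_of_pos (by norm_num),
      Int.mul_ediv_cancel_left _ (by norm_num)]
    ring
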